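-- pv_equiv track=rewrite | github.com/bonninr/organizer2 | console_pedalboard.py | generate_ago_pattern
-- ===== SOURCE A (Python) =====
-- def generate_ago_pattern(number_of_notes):
--     """
--     Generate AGO (American Guild of Organists) standard pedalboard pattern.
--
--     The standard pattern per octave is: s,t,s,t,s,b,s,t,s,t,s,t,s,b
--     Where: s=short (natural notes), t=tall (sharp/flat notes), b=blank space
--
--     Args:
--         number_of_notes: Total number of notes to generate
--
--     Returns:
--         Pattern string (e.g., "ststsb stststs b ststsb stststs b")
--     """
--     # Standard AGO pattern for one octave (14 positions: 12 notes + 2 blanks)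
--     octave_pattern = "ststsb stststs b"
--
--     # Calculate how many complete octaves and remaining notes
--     positions_per_octave = 14  # 12 notes + 2 blanks
--     notes_per_octave = 12
--
--     complete_octaves = number_of_notes // notes_per_octave
--     remaining_notes = number_of_notes % notes_per_octave
--
--     # Build the pattern
--     pattern_parts = []
--
--     # Add complete octaves
--     for _ in range(complete_octaves):
--         pattern_parts.append(octave_pattern)
--
--     # Add remaining notes if any
--     if remaining_notes > 0:
--         # Extract the needed portion of the pattern (excluding blanks)
--         partial_pattern = ""
--         note_count = 0
--         for char in octave_pattern:
--             if char != ' ':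
--                 partial_pattern += char
--                 if char in ['s', 't']:
--                     note_count += 1
--                     if note_count >= remaining_notes:
--                         break
--             elif partial_pattern:  # Add space if we've started building the pattern
--                 partial_pattern += char
--         pattern_parts.append(partial_pattern.strip())
--
--     return " ".join(pattern_parts)
-- ===== SOURCE B (Python) =====
-- def generate_ago_pattern(number_of_notes):
--     octave_pattern = "ststsb stststs b"
--     note_positions = [i for i, c in enumerate(octave_pattern) if c in "st"]
--     complete_octaves, remaining_notes = divmod(number_of_notes, 12)
--     parts = [octave_pattern] * max(complete_octaves, 0)
--     if remaining_notes > 0: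
--         cut = note_positions[remaining_notes - 1]
--         parts.append(octave_pattern[:cut + 1])
--     return " ".join(parts)
-- ===== Notes on version B (the rewrite author's own statement) =====
-- stated objective: simpler
-- what changed: The partial octave is obtained by indexing a precomputed list of note positions and taking one slice of the template, replacing A's char-by-char accumulator loop with count/break; complete octaves come from list multiplication instead of an append loop.
import Mathlib
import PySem

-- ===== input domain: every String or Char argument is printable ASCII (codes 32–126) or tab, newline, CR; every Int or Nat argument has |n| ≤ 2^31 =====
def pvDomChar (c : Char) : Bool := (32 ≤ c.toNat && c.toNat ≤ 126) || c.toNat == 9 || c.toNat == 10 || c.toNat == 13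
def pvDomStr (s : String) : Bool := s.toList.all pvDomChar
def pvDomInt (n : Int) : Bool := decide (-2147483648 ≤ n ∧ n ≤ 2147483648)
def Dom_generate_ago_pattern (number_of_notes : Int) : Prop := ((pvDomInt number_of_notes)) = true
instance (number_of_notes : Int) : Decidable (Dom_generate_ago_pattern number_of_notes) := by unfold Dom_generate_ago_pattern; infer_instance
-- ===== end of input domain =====

-- B replaces A's conditional char-by-char accumulation of the partial octave with a
-- precomputed note-position table and one slice (objective: simpler decomposition).


-- ===== PORT A =====
-- A's inner 'for char in octave_pattern' loop with its break, step for step.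
def agoPartialLoop (remaining : Int) : List Char → List Char → Int → List Char
  | [], partialPat, _ => partialPat
  | c :: rest, partialPat, noteCount =>
    if c ≠ ' ' then
      let partialPat' := partialPat ++ [c]
      if c = 's' ∨ c = 't' then
        if noteCount + 1 ≥ remaining then partialPat'
        else agoPartialLoop remaining rest partialPat' (noteCount + 1)
      else agoPartialLoop remaining rest partialPat' noteCount
    else if partialPat ≠ [] then agoPartialLoop remaining rest (partialPat ++ [' ']) noteCount
    else agoPartialLoop remaining rest partialPat noteCount

def generate_ago_pattern (number_of_notes : Int) : String :=
  let octave_pattern := "ststsb stststs b"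
  let complete_octaves := PySem.Int.floordiv number_of_notes 12
  let remaining_notes := PySem.Int.mod number_of_notes 12
  let pattern_parts : List String :=
    (PySem.List.pyRange 0 complete_octaves 1).foldl (fun acc _ => acc ++ [octave_pattern]) []
  let pattern_parts :=
    if remaining_notes > 0 then
      pattern_parts ++
        [PySem.Str.strip (String.ofList (agoPartialLoop remaining_notes octave_pattern.toList [] 0))]
    else pattern_parts
  PySem.Str.join " " pattern_parts

-- ===== PORT B =====
def generate_ago_pattern_alt (number_of_notes : Int) : String :=
  let octave_pattern := "ststsb stststs b"
  let note_positions : List Int :=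
    (PySem.List.enumerate octave_pattern.toList 0).filterMap
      (fun p => if p.2 = 's' ∨ p.2 = 't' then some p.1 else none)
  let complete_octaves := PySem.Int.floordiv number_of_notes 12
  let remaining_notes := PySem.Int.mod number_of_notes 12
  let parts := List.replicate (max complete_octaves 0).toNat octave_pattern
  let parts :=
    if remaining_notes > 0 then
      -- note_positions[remaining_notes - 1]: index always in range (1 ≤ r ≤ 11 < 12 = len)
      let cut := PySem.List.pyGetD note_positions (remaining_notes - 1) 0
      parts ++ [PySem.Str.slice octave_pattern none (some (cut + 1))]
    else parts
  PySem.Str.join " " parts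

-- ===== PRECONDITION & SPEC =====
def Spec_generate_ago_pattern (number_of_notes : Int) (out : String) : Prop := out = generate_ago_pattern_alt number_of_notes
instance (number_of_notes : Int) (out : String) : Decidable (Spec_generate_ago_pattern number_of_notes out) := by unfold Spec_generate_ago_pattern; infer_instance

-- ===== CLAIM (what is proved, stated in full; the proofs are below) =====
def Claim_equal_generate_ago_pattern : Prop := ∀ (number_of_notes : Int), Dom_generate_ago_pattern number_of_notes → Spec_generate_ago_pattern number_of_notes (generate_ago_pattern number_of_notes)

-- ===== LEMMAS AND PROOFS =====

-- A's octave loop builds the same list as B's replicate.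
theorem ago_fold_eq_replicate (q : Int) (s : String) :
    (PySem.List.pyRange 0 q 1).foldl (fun acc _ => acc ++ [s]) [] =
      List.replicate (max q 0).toNat s := by
  have h : (PySem.List.pyRange 0 q 1).foldl (fun acc _ => acc ++ [s]) [] =
      [] ++ (PySem.List.pyRange 0 q 1).map (fun _ => s) :=
    PySem.List.foldl_append_singleton_eq_map _ _ _
  rw [h, List.nil_append, List.map_const']
  congr 1
  simp [pysem]
  omega

-- For each residue r = n % 12, A's partial string equals B's slice.
theorem ago_partial_eq (r : Int) (h0 : 0 < r) (h12 : r < 12) :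
    PySem.Str.strip (String.ofList (agoPartialLoop r "ststsb stststs b".toList [] 0)) =
      PySem.Str.slice "ststsb stststs b" none
        (some (PySem.List.pyGetD
          ((PySem.List.enumerate "ststsb stststs b".toList 0).filterMap
            (fun p => if p.2 = 's' ∨ p.2 = 't' then some p.1 else none)) (r - 1) 0 + 1)) := by
  interval_cases r <;> decide

-- ===== VERDICT (by name: the statement is the Claim_ definition above) =====
theorem generate_ago_pattern_spec : Claim_equal_generate_ago_pattern := by
  intro n _
  unfold Spec_generate_ago_pattern generate_ago_pattern generate_ago_pattern_alt
  simp only []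
  rw [ago_fold_eq_replicate]
  by_cases hr : PySem.Int.mod n 12 > 0
  · rw [if_pos hr, if_pos hr,
      ago_partial_eq _ hr (PySem.Int.mod_lt n (by norm_num))]
  · rw [if_neg hr, if_neg hr]
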